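-- pv_equiv track=rewrite | github.com/gauravjha850/LeetCode-Solutions | 4290-valid-elements-in-an-array/valid-elements-in-an-array.py | findValidElements
-- ===== SOURCE A (Python) =====
-- def findValidElements(nums):
--     n = len(nums)
--     if n == 0: return []
--
--     is_valid = [False] * n
--     stack = []
--     left_max = float('-inf')
--
--     for i in range(n):
--
--         if nums[i] > left_max:
--             is_valid[i] = True
--             left_max = nums[i]
--
--
--         while stack and nums[i] >= nums[stack[-1]]:
--             stack.pop()
--
--         stack.append(i)
--
--
--     for idx in stack:
--         is_valid[idx] = True
--
--
--     return [nums[i] for i in range(n) if is_valid[i]]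
-- ===== SOURCE B (Python) =====
-- def findValidElements(nums):
--     def marks(xs):
--         out = []
--         best = None
--         for x in xs:
--             if best is None or x > best:
--                 out.append(True)
--                 best = x
--             else:
--                 out.append(False)
--         return out
--     left = marks(nums)
--     right = marks(nums[::-1])[::-1]
--     return [x for x, l, r in zip(nums, left, right) if l or r]
-- ===== Notes on version B (the rewrite author's own statement) =====
-- stated objective: simpler
-- what changed: Replaced the monotonic stack with while-pop and the final stack-marking pass by a symmetric pair of running-max scans (left-to-right and right-to-left over the reversed list), then a single zip-filter.
import Mathlib
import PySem

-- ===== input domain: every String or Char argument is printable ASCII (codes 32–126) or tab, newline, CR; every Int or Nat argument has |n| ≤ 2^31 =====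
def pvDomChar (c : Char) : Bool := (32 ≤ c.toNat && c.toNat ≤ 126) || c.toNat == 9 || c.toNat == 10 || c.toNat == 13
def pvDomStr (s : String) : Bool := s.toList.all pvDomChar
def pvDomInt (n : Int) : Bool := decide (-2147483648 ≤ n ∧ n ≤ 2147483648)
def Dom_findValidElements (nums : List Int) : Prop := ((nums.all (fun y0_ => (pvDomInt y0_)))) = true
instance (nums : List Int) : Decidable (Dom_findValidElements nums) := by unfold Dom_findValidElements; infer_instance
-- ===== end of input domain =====

-- B replaces A's monotonic stack (with while-pop and a final stack-marking pass) by two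
-- symmetric running-max scans; objective: simpler.

-- ===== PORT A =====
-- `optPred lm v` is Python's `v > left_max` where left_max may be float('-inf') (= none).
def optPred (lm : Option Int) (v : Int) : Bool :=
  match lm with
  | none => true
  | some m => decide (m < v)

-- the `while stack and nums[i] >= nums[stack[-1]]: stack.pop()` loop (stack head = top)
def popA (nums : List Int) (v : Int) : List Nat → List Nat
  | [] => []
  | j :: s => if nums.getD j 0 ≤ v then popA nums v s else j :: s

-- one iteration of `for i in range(n)` over state (is_valid, stack, left_max)
def stepA (nums : List Int) (st : List Bool × List Nat × Option Int) (i : Nat) :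
    List Bool × List Nat × Option Int :=
  let v := nums.getD i 0
  let marked := optPred st.2.2 v
  let valid' := if marked then st.1.set i true else st.1
  let lm' := if marked then some v else st.2.2
  (valid', i :: popA nums v st.2.1, lm')

def findValidElements (nums : List Int) : List Int :=
  let n := nums.length
  if n = 0 then []
  else
    let st := (List.range n).foldl (stepA nums) (List.replicate n false, ([] : List Nat), (none : Option Int))
    let valid2 := st.2.1.foldl (fun v idx => v.set idx true) st.1
    (List.range n).filterMap (fun i => if valid2.getD i false then some (nums.getD i 0) else none)

-- ===== PORT B =====
-- `marks best xs`: running strict-max scan, True where x > best-so-far.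
def marksB (best : Option Int) : List Int → List Bool
  | [] => []
  | x :: xs =>
    let b := optPred best x
    b :: marksB (if b then some x else best) xs

def findValidElements_alt (nums : List Int) : List Int :=
  let left := marksB none nums
  let right := (marksB none nums.reverse).reverse
  (nums.zip (left.zip right)).filterMap (fun p => if p.2.1 || p.2.2 then some p.1 else none)

-- ===== PRECONDITION & SPEC =====
def Spec_findValidElements (nums : List Int) (out : List Int) : Prop := out = findValidElements_alt nums
instance (nums : List Int) (out : List Int) : Decidable (Spec_findValidElements nums out) := by unfold Spec_findValidElements; infer_instance

-- ===== CLAIM (what is proved, stated in full; the proofs are below) =====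
def Claim_equal_findValidElements : Prop := ∀ (nums : List Int), Dom_findValidElements nums → Spec_findValidElements nums (findValidElements nums)

-- ===== LEMMAS AND PROOFS =====

-- strict prefix-max / strict suffix-max markers
def pmaxB (nums : List Int) (i : Nat) : Bool := decide (∀ k, k < i → nums.getD k 0 < nums.getD i 0)
def sfxB (nums : List Int) (i j : Nat) : Bool := decide (∀ k, k < i → j < k → nums.getD k 0 < nums.getD j 0)

theorem marksB_length (best : Option Int) (xs : List Int) : (marksB best xs).length = xs.length := by
  induction xs generalizing best with
  | nil => rfl
  | cons x xs ih => simp [marksB, ih]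

theorem optPred_update (lm : Option Int) (x v : Int) :
    optPred (if optPred lm x then some x else lm) v = (optPred lm v && decide (x < v)) := by
  cases lm with
  | none => simp [optPred]
  | some m =>
    by_cases hx : m < x
    · simp only [optPred, hx, decide_true, if_true]
      rw [Bool.eq_iff_iff]; simp only [Bool.and_eq_true, decide_eq_true_eq]; omega
    · simp only [optPred, hx, decide_false, Bool.false_eq_true, if_false]
      rw [Bool.eq_iff_iff]; simp only [Bool.and_eq_true, decide_eq_true_eq]; omega

theorem marksB_getD (xs : List Int) (lm : Option Int) (i : Nat) (hi : i < xs.length) :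
    (marksB lm xs).getD i false =
      (optPred lm (xs.getD i 0) && decide (∀ j, j < i → xs.getD j 0 < xs.getD i 0)) := by
  induction xs generalizing lm i with
  | nil => simp at hi
  | cons x xs ih =>
    cases i with
    | zero => simp [marksB]
    | succ i =>
      have hi' : i < xs.length := by simpa using hi
      show (optPred lm x :: marksB (if optPred lm x then some x else lm) xs).getD (i+1) false = _
      rw [List.getD_cons_succ, ih _ i hi', optPred_update, List.getD_cons_succ]
      have hsplit : (∀ j, j < i + 1 → (x :: xs).getD j 0 < xs.getD i 0) ↔
          (x < xs.getD i 0 ∧ ∀ j, j < i → xs.getD j 0 < xs.getD i 0) := by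
        constructor
        · intro h
          exact ⟨h 0 (Nat.succ_pos i), fun j hj => h (j+1) (by omega)⟩
        · rintro ⟨h0, h1⟩ j hj
          cases j with
          | zero => simpa using h0
          | succ j => simpa using h1 j (by omega)
      rw [Bool.eq_iff_iff]
      simp only [Bool.and_eq_true, decide_eq_true_eq, hsplit]
      tauto

theorem marksB_rev_getD (xs : List Int) (i : Nat) (hi : i < xs.length) :
    ((marksB none xs.reverse).reverse).getD i false = sfxB xs xs.length i := by
  have hlen : (marksB none xs.reverse).length = xs.length := by
    rw [marksB_length, List.length_reverse]
  have hi' : xs.length - 1 - i < xs.length := by omega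
  have h1 : ((marksB none xs.reverse).reverse).getD i false
      = (marksB none xs.reverse).getD (xs.length - 1 - i) false := by
    have hA : i < (marksB none xs.reverse).reverse.length := by simpa [hlen] using hi
    rw [List.getD_eq_getElem _ _ hA, List.getElem_reverse,
        List.getD_eq_getElem _ _ (by simpa [hlen] using hi')]
    simp only [hlen]
  rw [h1, marksB_getD _ _ _ (by simpa using hi')]
  simp only [optPred, Bool.true_and]
  have hg : ∀ j, j < xs.length → xs.reverse.getD j 0 = xs.getD (xs.length - 1 - j) 0 := by
    intro j hj
    rw [List.getD_eq_getElem _ _ (by simpa using hj), List.getElem_reverse,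
        List.getD_eq_getElem _ _ (by omega)]
  rw [Bool.eq_iff_iff]
  unfold sfxB
  simp only [decide_eq_true_eq]
  constructor
  · intro h k hk hik
    have hh := h (xs.length - 1 - k) (by omega)
    rw [hg _ (by omega), hg _ (by omega)] at hh
    have e1 : xs.length - 1 - (xs.length - 1 - k) = k := by omega
    have e2 : xs.length - 1 - (xs.length - 1 - i) = i := by omega
    rw [e1, e2] at hh
    exact hh
  · intro h j hj
    rw [hg _ (by omega), hg _ (by omega)]
    have e2 : xs.length - 1 - (xs.length - 1 - i) = i := by omega
    rw [e2]
    exact h (xs.length - 1 - j) (by omega) (by omega)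

theorem popA_eq_filter (nums : List Int) (v : Int) (s : List Nat)
    (h : s.Pairwise (fun a b => nums.getD a 0 < nums.getD b 0)) :
    popA nums v s = s.filter (fun j => decide (v < nums.getD j 0)) := by
  induction s with
  | nil => rfl
  | cons j s ih =>
    rw [List.pairwise_cons] at h
    by_cases hv : nums.getD j 0 ≤ v
    · rw [show popA nums v (j::s) = popA nums v s from by
            rw [popA, if_pos (by simpa using hv)], ih h.2, List.filter_cons]
      simp [show ¬ (v < nums[j]?.getD 0) from by rw [← List.getD_eq_getElem?_getD]; omega]
    · rw [show popA nums v (j::s) = j :: s from by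
            rw [popA, if_neg (by simpa using hv)], List.filter_cons]
      simp only [show decide (v < nums.getD j 0) = true from by simp only [decide_eq_true_eq]; omega, if_true]
      rw [List.filter_eq_self.2]
      intro a ha
      have := h.1 a ha
      simp only [decide_eq_true_eq]
      omega

theorem foldA_inv (nums : List Int) (i : Nat) (hi : i ≤ nums.length) :
    let st := (List.range i).foldl (stepA nums) (List.replicate nums.length false, ([] : List Nat), (none : Option Int))
    st.1.length = nums.length ∧
    (∀ j, st.1.getD j false = (decide (j < i) && pmaxB nums j)) ∧
    (∀ v, optPred st.2.2 v = decide (∀ j, j < i → nums.getD j 0 < v)) ∧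
    st.2.1 = ((List.range i).filter (fun j => sfxB nums i j)).reverse := by
  induction i with
  | zero =>
    refine ⟨by simp, fun j => by simp, fun v => by simp [optPred], by simp⟩
  | succ i ih =>
    obtain ⟨h1, h2, h3, h4⟩ := ih (by omega)
    have hin : i < nums.length := by omega
    rw [List.range_succ, List.foldl_append, List.foldl_cons, List.foldl_nil]
    set st := (List.range i).foldl (stepA nums)
      (List.replicate nums.length false, ([] : List Nat), (none : Option Int)) with hst
    show ((stepA nums st i).1.length = nums.length) ∧ _ ∧ _ ∧ _
    have hv : (nums.getD i 0 : Int) = nums.getD i 0 := rfl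
    have hmark : optPred st.2.2 (nums.getD i 0) = pmaxB nums i := by
      rw [h3]; rfl
    refine ⟨?_, ?_, ?_, ?_⟩
    · show (if optPred st.2.2 (nums.getD i 0) then st.1.set i true else st.1).length = nums.length
      split <;> simp [List.length_set, h1]
    · intro j
      show (if optPred st.2.2 (nums.getD i 0) then st.1.set i true else st.1).getD j false = _
      by_cases hj : j = i
      · subst hj
        rw [hmark]
        cases hp : pmaxB nums j with
        | true =>
          rw [if_pos rfl]
          rw [List.getD_eq_getElem _ _ (by rw [List.length_set, h1]; exact hin)]
          simp
        | false =>
          rw [if_neg (by simp), h2 j]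
          simp [hp]
      · have hne : (st.1.set i true).getD j false = st.1.getD j false := by
          rw [List.getD_eq_getElem?_getD, List.getElem?_set_ne (by omega),
            ← List.getD_eq_getElem?_getD]
        have hd : (decide (j < i + 1) : Bool) = decide (j < i) := by
          rw [Bool.eq_iff_iff]; simp only [decide_eq_true_eq]; omega
        rw [hd, ← h2 j]
        split <;> [exact hne; rfl]
    · intro w
      show optPred (if optPred st.2.2 (nums.getD i 0) then some (nums.getD i 0) else st.2.2) w = _
      rw [optPred_update, h3 w, Bool.eq_iff_iff]
      simp only [Bool.and_eq_true, decide_eq_true_eq]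
      constructor
      · rintro ⟨h, hvw⟩ j hj
        by_cases hji : j = i
        · subst hji; exact hvw
        · exact h j (by omega)
      · intro h
        exact ⟨fun j hj => h j (by omega), h i (by omega)⟩
    · show i :: popA nums (nums.getD i 0) st.2.1 = _
      have hpair : st.2.1.Pairwise (fun a b => nums.getD a 0 < nums.getD b 0) := by
        rw [h4, List.pairwise_reverse]
        have hp0 : ((List.range i).filter (fun j => sfxB nums i j)).Pairwise (· < ·) :=
          List.Pairwise.sublist List.filter_sublist List.pairwise_lt_range
        refine hp0.imp_of_mem ?_
        intro a b ha hb hab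
        have hma := List.mem_filter.mp ha
        have hmb := List.mem_filter.mp hb
        have hsa : ∀ k, k < i → a < k → nums.getD k 0 < nums.getD a 0 := by
          have := hma.2; unfold sfxB at this; simpa using this
        exact hsa b (List.mem_range.mp hmb.1) hab
      rw [popA_eq_filter nums _ _ hpair, h4]
      have hqi : sfxB nums (i+1) i = true := by
        unfold sfxB; simp only [decide_eq_true_eq]; intro k hk hik; omega
      rw [List.filter_append, show List.filter (fun j => sfxB nums (i+1) j) [i] = [i] from by
            simp [hqi],
          List.reverse_append]
      simp only [List.reverse_cons, List.reverse_nil, List.nil_append, List.singleton_append]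
      congr 1
      rw [List.filter_reverse, List.filter_filter]
      congr 1
      apply List.filter_congr
      intro j hj
      have hji : j < i := List.mem_range.mp hj
      rw [Bool.eq_iff_iff]
      unfold sfxB
      simp only [Bool.and_eq_true, decide_eq_true_eq]
      constructor
      · rintro ⟨hvj, hs⟩ k hk hjk
        by_cases hki : k = i
        · subst hki; exact hvj
        · exact hs k (by omega) hjk
      · intro h
        exact ⟨h i (by omega) hji, fun k hk hjk => h k (by omega) hjk⟩

theorem setfold_getD (s : List Nat) (valid : List Bool) (hs : ∀ i ∈ s, i < valid.length) (j : Nat) :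
    (s.foldl (fun v idx => v.set idx true) valid).getD j false = (valid.getD j false || decide (j ∈ s)) := by
  induction s generalizing valid with
  | nil => simp
  | cons a s ih =>
    simp only [List.foldl_cons]
    rw [ih _ (by intro i hi; rw [List.length_set]; exact hs i (List.mem_cons_of_mem a hi))]
    by_cases hj : j = a
    · subst hj
      have hjl : j < valid.length := hs j (List.mem_cons_self ..)
      rw [List.getD_eq_getElem _ _ (by simpa using hjl)]
      simp [List.getElem_set_self]
    · have hget : (valid.set a true).getD j false = valid.getD j false := by
        rw [List.getD_eq_getElem?_getD, List.getElem?_set_ne (by omega), ← List.getD_eq_getElem?_getD]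
      rw [hget]
      simp [List.mem_cons, hj]

theorem zip_filterMap (as : List Int) (bs cs : List Bool) (hb : bs.length = as.length) (hc : cs.length = as.length) :
    (as.zip (bs.zip cs)).filterMap (fun p => if p.2.1 || p.2.2 then some p.1 else none) =
      (List.range as.length).filterMap
        (fun i => if bs.getD i false || cs.getD i false then some (as.getD i 0) else none) := by
  induction as generalizing bs cs with
  | nil => simp
  | cons a as ih =>
    cases bs with
    | nil => simp at hb
    | cons b bs =>
      cases cs with
      | nil => simp at hc
      | cons c cs =>
        have hb' : bs.length = as.length := by simpa using hb
        have hc' : cs.length = as.length := by simpa using hc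
        rw [show ((a :: as).zip ((b :: bs).zip (c :: cs))) = (a, (b, c)) :: as.zip (bs.zip cs) from rfl,
            List.filterMap_cons, show (a :: as).length = as.length + 1 from rfl,
            List.range_succ_eq_map, List.filterMap_cons, List.filterMap_map]
        simp only [List.getD_cons_zero, List.getD_cons_succ, Function.comp]
        rw [ih bs cs hb' hc']

-- ===== VERDICT (by name: the statement is the Claim_ definition above) =====
theorem findValidElements_spec : Claim_equal_findValidElements := by
  unfold Claim_equal_findValidElements Spec_findValidElements
  intro nums _
  by_cases hn : nums.length = 0
  · have hnil : nums = [] := List.length_eq_zero_iff.mp hn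
    subst hnil
    rfl
  · obtain ⟨h1, h2, h3, h4⟩ := foldA_inv nums nums.length le_rfl
    set st := (List.range nums.length).foldl (stepA nums)
      (List.replicate nums.length false, ([] : List Nat), (none : Option Int)) with hst
    show findValidElements nums = findValidElements_alt nums
    rw [show findValidElements nums =
          (List.range nums.length).filterMap (fun i =>
            if (st.2.1.foldl (fun v idx => v.set idx true) st.1).getD i false then
              some (nums.getD i 0) else none) from by
        unfold findValidElements; rw [if_neg hn]]
    rw [show findValidElements_alt nums =
          (nums.zip ((marksB none nums).zip ((marksB none nums.reverse).reverse))).filterMap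
            (fun p => if p.2.1 || p.2.2 then some p.1 else none) from rfl]
    rw [zip_filterMap nums (marksB none nums) ((marksB none nums.reverse).reverse)
          (marksB_length none nums)
          (by rw [List.length_reverse, marksB_length, List.length_reverse])]
    apply List.filterMap_congr
    intro i hi
    have hilt : i < nums.length := List.mem_range.mp hi
    have hsl : ∀ idx ∈ st.2.1, idx < st.1.length := by
      rw [h4, h1]
      intro idx hidx
      rw [List.mem_reverse, List.mem_filter] at hidx
      exact List.mem_range.mp hidx.1
    rw [setfold_getD st.2.1 st.1 hsl i, h2 i]
    have hmem : (decide (i ∈ st.2.1) : Bool) = sfxB nums nums.length i := by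
      rw [h4, Bool.eq_iff_iff]
      simp only [decide_eq_true_eq, List.mem_reverse, List.mem_filter, List.mem_range]
      constructor
      · rintro ⟨_, hs⟩; exact hs
      · intro hs; exact ⟨hilt, hs⟩
    rw [hmem, marksB_getD nums none i hilt, marksB_rev_getD nums i hilt]
    simp only [optPred, Bool.true_and]
    rw [show (decide (i < nums.length) : Bool) = true from by simp [hilt], Bool.true_and]
    rfl
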